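-- pv_equiv track=rewrite | github.com/RahulkTiwari/ngUDM | PythonApps/DataChecks/ens_data_quality.py | isin_check_digit
-- ===== SOURCE A (Python) =====
-- def isin_check_digit(isin):
--     try:
--         check_digit = isin[11]
--     except IndexError:
--         return False
--
--     _alphabet = '0123456789ABCDEFGHIJKLMNOPQRSTUVWXYZ'
--     isin = isin.strip().upper()
--     number = ''.join(str(_alphabet.index(n)) for n in isin[:11])
--     number = ''.join(str((2, 1)[i % 2] * int(n)) for i, n in enumerate(reversed(number)))
--     calculated_check_digit = str((10 - sum(int(n) for n in number)) % 10)
--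
--     return calculated_check_digit == check_digit
-- ===== SOURCE B (Python) =====
-- _ALPHABET = '0123456789ABCDEFGHIJKLMNOPQRSTUVWXYZ'
-- # precomputed expansion of each symbol into its decimal digits (10..35 -> two digits)
-- _DIGITS = {c: ([i] if i < 10 else [i // 10, i % 10]) for i, c in enumerate(_ALPHABET)}
--
--
-- def isin_check_digit(isin):
--     if len(isin) < 12:
--         return False
--     check_digit = isin[11]
--     s = isin.strip().upper()
--     # single forward pass, no reversal: keep two Luhn sums in parallel
--     # (s_even doubles digits at even left-index, s_odd doubles at odd left-index)
--     # and select the right one at the end by the parity of the expanded length.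
--     s_even = s_odd = 0
--     j = 0
--     for c in s[:11]:
--         for d in _DIGITS[c]:
--             x = 2 * d
--             if x > 9:
--                 x -= 9
--             if j % 2 == 0:
--                 s_even += x
--                 s_odd += d
--             else:
--                 s_even += d
--                 s_odd += x
--             j += 1
--     total = s_even if j % 2 == 1 else s_odd
--     return str((10 - total) % 10) == check_digit
-- ===== Notes on version B (the rewrite author's own statement) =====
-- stated objective: alternative
-- what changed: B replaces A's staged string pipeline (join indices into a digit string, reverse it, join weighted digits into a second string, sum its characters) with a single forward pass that never reverses: it expands each symbol via a precomputed digit table and maintains two parallel Luhn accumulators (one per parity convention), selecting the correct one at the end by the parity of the expanded length.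
import Mathlib
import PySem

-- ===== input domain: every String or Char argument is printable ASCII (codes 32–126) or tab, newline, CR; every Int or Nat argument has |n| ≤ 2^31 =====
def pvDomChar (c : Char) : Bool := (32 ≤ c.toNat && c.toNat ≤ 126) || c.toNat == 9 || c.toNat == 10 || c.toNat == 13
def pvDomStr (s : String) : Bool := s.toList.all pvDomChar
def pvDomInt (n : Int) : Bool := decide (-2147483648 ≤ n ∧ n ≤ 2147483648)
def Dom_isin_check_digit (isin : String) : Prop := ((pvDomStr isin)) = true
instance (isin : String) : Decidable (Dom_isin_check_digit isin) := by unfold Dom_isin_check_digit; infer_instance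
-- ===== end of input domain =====

-- B does one forward pass with two parallel Luhn accumulators (no reversal, no intermediate
-- digit strings), expanding symbols via a precomputed table; objective: alternative.

-- ===== PORT A =====

def pvAlphabet : List Char :=
  ['0','1','2','3','4','5','6','7','8','9','A','B','C','D','E','F','G','H',
   'I','J','K','L','M','N','O','P','Q','R','S','T','U','V','W','X','Y','Z']

-- int(n) on a single digit character n ('0'..'9'); exact there
def pvDigitVal (c : Char) : Int := (c.toNat : Int) - 48

-- ''.join(str(_alphabet.index(n)) for n in isin[:11]); none = ValueError from .index
def pvIndexJoin : List Char → Option (List Char)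
  | [] => some []
  | c :: rest =>
    match PySem.List.index? pvAlphabet c with
    | none => none
    | some i =>
      match pvIndexJoin rest with
      | none => none
      | some r => some (PySem.Int.toChars (i : Int) ++ r)

-- ''.join(str((2, 1)[i % 2] * int(n)) for i, n in enumerate(reversed(number)))
def pvWeigh : Nat → List Char → List Char
  | _, [] => []
  | i, n :: rest =>
    PySem.Int.toChars ((if i % 2 = 0 then 2 else 1) * pvDigitVal n) ++ pvWeigh (i + 1) rest

-- sum(int(n) for n in number)
def pvSumDigits (cs : List Char) : Int := (cs.map pvDigitVal).sum

def isin_check_digit (isin : String) : Bool :=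
  match PySem.Str.pyGet? isin 11 with
  | none => false                       -- except IndexError: return False
  | some check_digit =>
    match pvIndexJoin (PySem.List.slice
        (PySem.Chars.upper (PySem.Chars.strip isin.toList)) none (some 11)) with
    | none => false                     -- Python raises ValueError here; excluded by Pre_
    | some number =>
      PySem.Int.toChars (PySem.Int.mod (10 - pvSumDigits (pvWeigh 0 number.reverse)) 10)
        == [check_digit]

-- ===== PORT B =====

-- _DIGITS = {c: ([i] if i < 10 else [i // 10, i % 10]) for i, c in enumerate(_ALPHABET)}
def pvTable : PySem.Dict Char (List Int) :=
  (PySem.List.enumerate pvAlphabet).foldl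
    (fun d p =>
      d.insert p.2 (if p.1 < 10 then [p.1]
                    else [PySem.Int.floordiv p.1 10, PySem.Int.mod p.1 10]))
    PySem.Dict.empty

-- the body of B's inner loop: one expanded digit d updates (s_even, s_odd, j)
def pvStep (st : Int × Int × Nat) (d : Int) : Int × Int × Nat :=
  let x0 := 2 * d
  let x := if x0 > 9 then x0 - 9 else x0
  match st with
  | (sE, sO, j) =>
    if j % 2 = 0 then (sE + x, sO + d, j + 1) else (sE + d, sO + x, j + 1)

-- B's outer loop over the first 11 characters; none = KeyError on _DIGITS[c]
def pvLoopB : List Char → (Int × Int × Nat) → Option (Int × Int × Nat)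
  | [], st => some st
  | c :: rest, st =>
    match PySem.Dict.get? pvTable c with
    | none => none                      -- KeyError; excluded by Pre_
    | some ds => pvLoopB rest (ds.foldl pvStep st)

def isin_check_digit_alt (isin : String) : Bool :=
  if isin.toList.length < 12 then false
  else
    match isin.toList[11]? with
    | none => false                     -- unreachable after the length test
    | some check_digit =>
      match pvLoopB (PySem.List.slice
          (PySem.Chars.upper (PySem.Chars.strip isin.toList)) none (some 11)) (0, 0, 0) with
      | none => false                   -- KeyError; excluded by Pre_
      | some (sE, sO, j) =>
        PySem.Int.toChars (PySem.Int.mod (10 - (if j % 2 = 1 then sE else sO)) 10)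
          == [check_digit]

-- ===== PRECONDITION & SPEC =====
-- Pre_ excludes only inputs where Python A raises ValueError (B raises KeyError there): a
-- string of length at least 12 whose first 11 stripped/uppercased characters are not all
-- alphanumeric (decimal digits or uppercase letters).
def Pre_isin_check_digit (isin : String) : Prop :=
  12 ≤ isin.toList.length →
    (((PySem.Chars.upper (PySem.Chars.strip isin.toList)).take 11).all
      (pvAlphabet.contains ·)) = true
instance (isin : String) : Decidable (Pre_isin_check_digit isin) := by
  unfold Pre_isin_check_digit; infer_instance

def pvWitness_isin_check_digit : String := "US0378331005"

def Spec_isin_check_digit (isin : String) (out : Bool) : Prop := out = isin_check_digit_alt isin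
instance (isin : String) (out : Bool) : Decidable (Spec_isin_check_digit isin out) := by
  unfold Spec_isin_check_digit; infer_instance

-- ===== CLAIM (what is proved, stated in full; the proofs are below) =====
def Claim_equal_isin_check_digit : Prop := ∀ (isin : String), Dom_isin_check_digit isin → Pre_isin_check_digit isin → Spec_isin_check_digit isin (isin_check_digit isin)

-- ===== LEMMAS AND PROOFS =====

-- proof-side model of A's reversed weighted digit sum
def pvLuhn : Nat → List Int → Int
  | _, [] => 0
  | i, d :: rest =>
    let x := if i % 2 = 0 then 2 * d else d
    (if x < 10 then x else x - 9) + pvLuhn (i + 1) rest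

-- proof-side model of B's two accumulators: pvF e ds doubles the head iff e
def pvF : Bool → List Int → Int
  | _, [] => 0
  | e, d :: rest =>
    (if e then (if 2 * d > 9 then 2 * d - 9 else 2 * d) else d) + pvF (!e) rest

-- per-character agreement of _alphabet.index and the precomputed _DIGITS table
set_option maxRecDepth 16384 in
set_option maxHeartbeats 2000000 in
theorem pv_char_fact : ∀ c ∈ pvAlphabet,
    PySem.List.index? pvAlphabet c ≠ none ∧
    PySem.Dict.get? pvTable c
      = some ((PySem.Int.toChars
          (((PySem.List.index? pvAlphabet c).getD 0 : Nat) : Int)).map pvDigitVal) ∧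
    ∀ d ∈ (PySem.Dict.get? pvTable c).getD [], 0 ≤ d ∧ d < 10 := by
  intro c hc; fin_cases hc <;> exact ⟨by decide, by decide, by decide⟩

theorem pv_digitsum_small (x : Int) (h0 : 0 ≤ x) (h1 : x < 19) :
    ((PySem.Int.toChars x).map pvDigitVal).sum = if x < 10 then x else x - 9 := by
  interval_cases x <;> decide

-- A's second string pass equals the reversed weighted sum pvLuhn
theorem pv_weigh_eq_luhn (cs : List Char) (i : Nat)
    (hb : ∀ ch ∈ cs, 0 ≤ pvDigitVal ch ∧ pvDigitVal ch < 10) :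
    pvSumDigits (pvWeigh i cs) = pvLuhn i (cs.map pvDigitVal) := by
  induction cs generalizing i with
  | nil => rfl
  | cons n rest ih =>
    obtain ⟨hd0, hd1⟩ := hb n List.mem_cons_self
    have hrest := fun ch hch => hb ch (List.mem_cons_of_mem _ hch)
    simp only [pvWeigh, pvLuhn, pvSumDigits, List.map, List.map_append, List.sum_append]
    rw [show ((PySem.Int.toChars ((if i % 2 = 0 then 2 else 1) * pvDigitVal n)).map pvDigitVal).sum
        = (if (if i % 2 = 0 then 2 * pvDigitVal n else pvDigitVal n) < 10
            then (if i % 2 = 0 then 2 * pvDigitVal n else pvDigitVal n)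
            else (if i % 2 = 0 then 2 * pvDigitVal n else pvDigitVal n) - 9) from ?_]
    · have := ih (i + 1) hrest
      simp only [pvSumDigits] at this
      rw [this]
    · have hx : (if i % 2 = 0 then 2 else 1 : Int) * pvDigitVal n
        = (if i % 2 = 0 then 2 * pvDigitVal n else pvDigitVal n) := by split <;> ring
      rw [hx]
      exact pv_digitsum_small _ (by split <;> omega) (by split <;> omega)

theorem pv_luhn_append (xs ys : List Int) (i : Nat) :
    pvLuhn i (xs ++ ys) = pvLuhn i xs + pvLuhn (i + xs.length) ys := by
  induction xs generalizing i with
  | nil => simp [pvLuhn]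
  | cons d rest ih =>
    simp only [List.cons_append, pvLuhn, ih (i + 1), List.length_cons]
    rw [show i + 1 + rest.length = i + (rest.length + 1) by omega]
    ring

-- the reversed weighted sum equals B's parity-selected forward sum
theorem pv_luhn_rev (ds : List Int) (hb : ∀ d ∈ ds, 0 ≤ d ∧ d < 10) :
    pvLuhn 0 ds.reverse = pvF (ds.length % 2 == 1) ds := by
  induction ds with
  | nil => rfl
  | cons d rest ih =>
    obtain ⟨hd0, hd1⟩ := hb d List.mem_cons_self
    have hrest := ih (fun x hx => hb x (List.mem_cons_of_mem _ hx))
    rw [List.reverse_cons, pv_luhn_append, hrest]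
    rcases Nat.mod_two_eq_zero_or_one rest.length with h | h
    · have h' : (rest.length + 1) % 2 = 1 := by omega
      have e1 : (((rest.length + 1) % 2 : Nat) == 1) = true := by rw [h']; rfl
      have e0 : ((rest.length % 2 : Nat) == 1) = false := by rw [h]; rfl
      simp only [List.length_cons, List.length_reverse, zero_add, e1, pvF, pvLuhn, h,
        reduceIte, add_zero]
      rw [show (if 2 * d < 10 then 2 * d else 2 * d - 9)
            = (if 2 * d > 9 then 2 * d - 9 else 2 * d) by split_ifs <;> omega,
         show ((0 : Nat) == 1) = false from rfl, show (!true) = false from rfl]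
      ring
    · have h' : (rest.length + 1) % 2 = 0 := by omega
      have e1 : (((rest.length + 1) % 2 : Nat) == 1) = false := by rw [h']; rfl
      have e0 : ((rest.length % 2 : Nat) == 1) = true := by rw [h]; rfl
      simp only [List.length_cons, List.length_reverse, zero_add, e1, pvF, pvLuhn, h,
        reduceIte, add_zero, one_ne_zero, if_false]
      rw [if_pos hd1, show ((1 : Nat) == 1) = true from rfl,
         show (!false) = true from rfl, if_neg (Bool.false_ne_true)]
      ring

-- B's inner fold in terms of pvF
theorem pv_foldl_step (ds : List Int) (a b : Int) (k : Nat) :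
    List.foldl pvStep (a, b, k) ds
      = (a + pvF (k % 2 == 0) ds, b + pvF (!(k % 2 == 0)) ds, k + ds.length) := by
  induction ds generalizing a b k with
  | nil => simp [pvF]
  | cons d rest ih =>
    rcases Nat.mod_two_eq_zero_or_one k with h | h
    · have e : (k % 2 == 0) = true := by rw [h]; rfl
      have e1 : ((k + 1) % 2 == 0) = false := by rw [show (k + 1) % 2 = 1 by omega]; rfl
      rw [List.foldl_cons, show pvStep (a, b, k) d
          = (a + (if 2 * d > 9 then 2 * d - 9 else 2 * d), b + d, k + 1) from by
            simp [pvStep, h], ih, e, e1]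
      simp only [pvF, Bool.not_true, Bool.not_false, Bool.false_eq_true, if_true, if_false,
        Prod.mk.injEq, List.length_cons]
      refine ⟨by ring, by ring, by omega⟩
    · have e : (k % 2 == 0) = false := by rw [h]; rfl
      have e1 : ((k + 1) % 2 == 0) = true := by rw [show (k + 1) % 2 = 0 by omega]; rfl
      rw [List.foldl_cons, show pvStep (a, b, k) d
          = (a + d, b + (if 2 * d > 9 then 2 * d - 9 else 2 * d), k + 1) from by
            simp [pvStep, h], ih, e, e1]
      simp only [pvF, Bool.not_true, Bool.not_false, Bool.false_eq_true, if_true, if_false,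
        Prod.mk.injEq, List.length_cons]
      refine ⟨by ring, by ring, by omega⟩

-- the two passes over the characters agree: A's index-join vs B's table loop
set_option maxRecDepth 65536 in
theorem pv_join_flat (t : List Char) (h : ∀ c ∈ t, c ∈ pvAlphabet) :
    ∃ number ds, pvIndexJoin t = some number ∧
      (∀ st, pvLoopB t st = some (ds.foldl pvStep st)) ∧
      number.map pvDigitVal = ds ∧ ∀ d ∈ ds, 0 ≤ d ∧ d < 10 := by
  induction t with
  | nil => exact ⟨[], [], rfl, fun st => rfl, rfl, by intro d h'; cases h'⟩
  | cons c rest ih =>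
    obtain ⟨number, ds, h1, h2, h3, h4⟩ := ih (fun x hx => h x (List.mem_cons_of_mem _ hx))
    obtain ⟨hne, hget, hbnd⟩ := pv_char_fact c (h c List.mem_cons_self)
    cases hidx : PySem.List.index? pvAlphabet c with
    | none => exact absurd hidx hne
    | some v =>
      rw [hidx] at hget
      simp only [Option.getD_some] at hget
      rw [hget] at hbnd
      simp only [Option.getD_some] at hbnd
      refine ⟨PySem.Int.toChars (v : Int) ++ number,
        (PySem.Int.toChars (v : Int)).map pvDigitVal ++ ds, ?_, ?_, ?_, ?_⟩
      · simp only [pvIndexJoin, hidx, h1]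
      · intro st
        have hstep : pvLoopB (c :: rest) st
            = match PySem.Dict.get? pvTable c with
              | none => none
              | some ds0 => pvLoopB rest (ds0.foldl pvStep st) := rfl
        rw [hstep, hget]
        dsimp only
        rw [h2, List.foldl_append]
      · rw [List.map_append, h3]
      · intro d hd
        rcases List.mem_append.1 hd with h' | h'
        · exact hbnd d h'
        · exact h4 d h'

-- ===== VERDICT (by name: the statement is the Claim_ definition above) =====
set_option maxRecDepth 8192 in
theorem isin_check_digit_spec : Claim_equal_isin_check_digit := by
  intro isin _ hpre
  unfold Spec_isin_check_digit isin_check_digit isin_check_digit_alt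
  have hget : PySem.Str.pyGet? isin 11 = isin.toList[11]? := by simp [pysem]
  rw [hget]
  by_cases hlen : isin.toList.length < 12
  · have hnone : isin.toList[11]? = none := by rw [List.getElem?_eq_none_iff]; omega
    rw [hnone, if_pos hlen]
  · have h11 : (11 : Nat) < isin.toList.length := by omega
    rw [List.getElem?_eq_getElem h11, if_neg hlen]
    have hslice : PySem.List.slice (PySem.Chars.upper (PySem.Chars.strip isin.toList)) none (some 11)
        = (PySem.Chars.upper (PySem.Chars.strip isin.toList)).take 11 := by
      simp [pysem]
    have hmem : ∀ c ∈ (PySem.Chars.upper (PySem.Chars.strip isin.toList)).take 11,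
        c ∈ pvAlphabet := by
      have h' := hpre (by omega)
      rw [List.all_eq_true] at h'
      intro c hc; simpa using h' c hc
    obtain ⟨number, ds, hA, hB, hmap, hbnd⟩ :=
      pv_join_flat ((PySem.Chars.upper (PySem.Chars.strip isin.toList)).take 11) hmem
    simp only [hslice, hA, hB (0, 0, 0)]
    rw [pv_foldl_step]
    have hbc : ∀ ch ∈ number.reverse, 0 ≤ pvDigitVal ch ∧ pvDigitVal ch < 10 := by
      intro ch hch
      exact hbnd _ (by rw [← hmap]; exact List.mem_map_of_mem (List.mem_reverse.1 hch))
    rw [pv_weigh_eq_luhn number.reverse 0 hbc]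
    rw [List.map_reverse, hmap, pv_luhn_rev ds hbnd]
    simp only [zero_add, Nat.zero_mod]
    rcases Nat.mod_two_eq_zero_or_one ds.length with h | h <;> simp [h]
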